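-- pv_equiv track=rewrite | github.com/yaspur/pruebas_tecnicas | ejercicio24.py | renombrarArchivos
-- ===== SOURCE A (Python) =====
-- def renombrarArchivos(archivos):
--
--     cantidad_archivos = {}
--     lista_archivos = []
--
--     for archivo in archivos:
--
--         if archivo in cantidad_archivos:
--             cantidad_archivos[archivo] += 1
--             nombre_archivo = f"{archivo}({cantidad_archivos[archivo] - 1})"
--             lista_archivos.append(nombre_archivo)
--         else:
--             cantidad_archivos[archivo] = 1
--             lista_archivos.append(archivo)
--
--     return lista_archivos
-- ===== SOURCE B (Python) =====
-- def renombrarArchivos(archivos):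
--     restantes = {}
--     for archivo in archivos:
--         restantes[archivo] = restantes.get(archivo, 0) + 1
--     resultado = []
--     for archivo in reversed(archivos):
--         restantes[archivo] -= 1
--         k = restantes[archivo]
--         resultado.append(archivo if k == 0 else f"{archivo}({k})")
--     resultado.reverse()
--     return resultado
-- ===== Notes on version B (the rewrite author's own statement) =====
-- stated objective: alternative
-- what changed: A streams once with a count-up dict, labelling each duplicate as it arrives; B first totals all occurrences, then walks the list in reverse decrementing the totals and building the output back-to-front, reversing at the end.
import Mathlib
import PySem

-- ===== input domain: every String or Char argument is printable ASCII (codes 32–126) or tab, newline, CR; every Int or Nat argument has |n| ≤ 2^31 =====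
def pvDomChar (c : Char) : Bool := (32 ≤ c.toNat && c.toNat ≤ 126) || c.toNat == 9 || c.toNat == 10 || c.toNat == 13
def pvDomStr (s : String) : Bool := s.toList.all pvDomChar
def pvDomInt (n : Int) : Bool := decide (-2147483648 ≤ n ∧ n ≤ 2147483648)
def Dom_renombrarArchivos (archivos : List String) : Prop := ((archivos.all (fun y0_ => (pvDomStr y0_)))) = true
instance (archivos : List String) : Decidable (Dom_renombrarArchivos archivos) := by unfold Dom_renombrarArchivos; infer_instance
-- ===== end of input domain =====

-- B replaces A's streaming count-up dict with a total-count pass followed by a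
-- back-to-front count-down pass (objective: alternative decomposition, same cost).

-- ===== PORT A =====
-- one forward pass; dict counts occurrences seen so far, duplicates get "(count-1)" after increment
def renombrarArchivos (archivos : List String) : List String :=
  (archivos.foldl
    (fun (st : PySem.Dict String Int × List String) archivo =>
      if st.1.contains archivo then
        let d' := st.1.modify archivo 0 (· + 1)
        let nombre := archivo ++ "(" ++ PySem.Int.toStr (d'.getD archivo 0 - 1) ++ ")"
        (d', st.2 ++ [nombre])
      else
        (st.1.insert archivo 1, st.2 ++ [archivo]))
    (PySem.Dict.empty, [])).2

-- ===== PORT B =====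
-- pass 1: total counts; pass 2: walk reversed(archivos) decrementing counts, append, final reverse
def renombrarArchivos_alt (archivos : List String) : List String :=
  let restantes := archivos.foldl
    (fun (d : PySem.Dict String Int) archivo => d.insert archivo (d.getD archivo 0 + 1))
    PySem.Dict.empty
  let st := archivos.reverse.foldl
    (fun (st : PySem.Dict String Int × List String) archivo =>
      let d := st.1.modify archivo 0 (· - 1)
      let k := d.getD archivo 0
      (d, st.2 ++ [if k = 0 then archivo else archivo ++ "(" ++ PySem.Int.toStr k ++ ")"]))
    (restantes, [])
  st.2.reverse

-- ===== PRECONDITION & SPEC =====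
def Spec_renombrarArchivos (archivos : List String) (out : List String) : Prop := out = renombrarArchivos_alt archivos
instance (archivos : List String) (out : List String) : Decidable (Spec_renombrarArchivos archivos out) := by unfold Spec_renombrarArchivos; infer_instance

-- ===== CLAIM (what is proved, stated in full; the proofs are below) =====
def Claim_equal_renombrarArchivos : Prop := ∀ (archivos : List String), Dom_renombrarArchivos archivos → Spec_renombrarArchivos archivos (renombrarArchivos archivos)

-- ===== LEMMAS AND PROOFS =====

-- the common pointwise description: each name labelled by its count in the preceding prefix
def pvLabel (a : String) (k : Int) : String :=
  if k = 0 then a else a ++ "(" ++ PySem.Int.toStr k ++ ")"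

def pvSpec (pre : List String) : List String → List String
  | [] => []
  | a :: t => pvLabel a (pre.count a) :: pvSpec (pre ++ [a]) t

theorem pvSpec_append_singleton (u : List String) : ∀ (pre : List String) (a : String),
    pvSpec pre (u ++ [a]) = pvSpec pre u ++ [pvLabel a ((pre ++ u).count a)] := by
  induction u with
  | nil => intro pre a; simp [pvSpec]
  | cons b t ih =>
      intro pre a
      simp [pvSpec, ih (pre ++ [b]) a, List.append_assoc]

-- A's loop computes pvSpec, given the dict holds the prefix counts
theorem pvAloop (l : List String) : ∀ (pre : List String) (d : PySem.Dict String Int)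
    (acc : List String),
    (∀ a, d.getD a 0 = (pre.count a : Int)) →
    (∀ a, d.contains a = decide (a ∈ pre)) →
    (l.foldl
      (fun (st : PySem.Dict String Int × List String) archivo =>
        if st.1.contains archivo then
          let d' := st.1.modify archivo 0 (· + 1)
          let nombre := archivo ++ "(" ++ PySem.Int.toStr (d'.getD archivo 0 - 1) ++ ")"
          (d', st.2 ++ [nombre])
        else
          (st.1.insert archivo 1, st.2 ++ [archivo]))
      (d, acc)).2 = acc ++ pvSpec pre l := by
  induction l with
  | nil => intro pre d acc _ _; simp [pvSpec]
  | cons a t ih =>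
      intro pre d acc hcnt hmem
      by_cases hin : a ∈ pre
      · have hc0 : pre.count a ≠ 0 := by
          have := List.count_pos_iff.mpr hin; omega
        simp only [List.foldl_cons, hmem a, hin, decide_true, if_true]
        rw [ih (pre ++ [a]) _ _ ?_ ?_]
        · rw [PySem.Dict.getD_modify_self, hcnt a]
          rw [show ((pre.count a : Int) + 1 - 1) = (pre.count a : Int) by ring]
          simp [pvSpec, pvLabel, hc0, List.append_assoc]
        · intro b
          rw [PySem.Dict.getD_modify, hcnt b]
          by_cases hb : b = a
          · subst hb; simp [List.count_append, hcnt]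
          · simp [hb, List.count_append, List.count_cons]
            exact fun h => hb h.symm
        · intro b
          rw [PySem.Dict.contains_modify, hmem b]
          by_cases hb : b = a
          · subst hb; simp [hin]
          · simp [hb]
      · have hc0 : pre.count a = 0 := List.count_eq_zero.mpr hin
        simp only [List.foldl_cons, hmem a, hin, decide_false, Bool.false_eq_true, if_false]
        rw [ih (pre ++ [a]) _ _ ?_ ?_]
        · simp [pvSpec, pvLabel, hc0, List.append_assoc]
        · intro b
          rw [PySem.Dict.getD_insert, hcnt b]
          by_cases hb : b = a
          · subst hb; simp [List.count_append, hc0]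
          · simp [hb, List.count_append, List.count_cons]
            exact fun h => hb h.symm
        · intro b
          rw [PySem.Dict.contains_insert, hmem b]
          by_cases hb : b = a
          · subst hb; simp
          · simp [hb]

-- B's second (reverse) loop computes pvSpec backwards, given the dict holds u ++ l.reverse counts
theorem pvBloop (u : List String) (l : List String) : ∀ (d : PySem.Dict String Int)
    (acc : List String),
    (∀ a, d.getD a 0 = ((u ++ l.reverse).count a : Int)) →
    (l.foldl
      (fun (st : PySem.Dict String Int × List String) archivo =>
        let d := st.1.modify archivo 0 (· - 1)
        let k := d.getD archivo 0
        (d, st.2 ++ [if k = 0 then archivo else archivo ++ "(" ++ PySem.Int.toStr k ++ ")"]))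
      (d, acc)).2 = acc ++ (pvSpec u l.reverse).reverse := by
  induction l with
  | nil => intro d acc _; simp [pvSpec]
  | cons a t ih =>
      intro d acc hcnt
      have hsplit : (u ++ (a :: t).reverse).count a = (u ++ t.reverse).count a + 1 := by
        simp [List.count_append]
        omega
      have hk : (d.modify a 0 (· - 1)).getD a 0 = (((u ++ t.reverse).count a : Nat) : Int) := by
        rw [PySem.Dict.getD_modify_self, hcnt a, hsplit]
        push_cast; ring
      simp only [List.foldl_cons]
      rw [ih _ _ ?_]
      · rw [hk]
        rw [show (a :: t).reverse = t.reverse ++ [a] by simp, pvSpec_append_singleton]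
        simp [pvLabel, List.append_assoc]
      · intro b
        rw [PySem.Dict.getD_modify]
        by_cases hb : b = a
        · subst hb; simpa using hk
        · rw [if_neg hb, hcnt b]
          have : (u ++ (a :: t).reverse).count b = (u ++ t.reverse).count b := by
            simp [List.count_append, List.count_cons]
            exact fun h => hb h.symm
          rw [this]

theorem pvA_eq_spec (xs : List String) : renombrarArchivos xs = pvSpec [] xs := by
  unfold renombrarArchivos
  rw [pvAloop xs [] PySem.Dict.empty []]
  · simp
  · intro a; simp [PySem.Dict.getD_empty]
  · intro a; simp [PySem.Dict.contains_empty]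

theorem pvB_eq_spec (xs : List String) : renombrarArchivos_alt xs = pvSpec [] xs := by
  show ((xs.reverse.foldl
      (fun (st : PySem.Dict String Int × List String) archivo =>
        let d := st.1.modify archivo 0 (· - 1)
        let k := d.getD archivo 0
        (d, st.2 ++ [if k = 0 then archivo else archivo ++ "(" ++ PySem.Int.toStr k ++ ")"]))
      (xs.foldl
        (fun (d : PySem.Dict String Int) archivo => d.insert archivo (d.getD archivo 0 + 1))
        PySem.Dict.empty, [])).2).reverse = pvSpec [] xs
  rw [pvBloop [] xs.reverse _ []]
  · simp
  · intro a
    rw [PySem.Dict.getD_foldl_insert_add_one, PySem.Dict.getD_empty]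
    simp

-- ===== VERDICT (by name: the statement is the Claim_ definition above) =====
theorem renombrarArchivos_spec : Claim_equal_renombrarArchivos := by
  intro archivos _
  unfold Spec_renombrarArchivos
  rw [pvA_eq_spec, pvB_eq_spec]
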